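-- pv_equiv track=rewrite | github.com/pluuushka/graphs_lab | utils.py | graphs_connection
-- ===== SOURCE A (Python) =====
-- def graphs_connection(A, B):
--     n1 = len(A)
--     n2 = len(B)
--     cur_size = n1 + n2
--
--     R = [[0] * cur_size for _ in range(cur_size)]
--
--     for i in range(n1):
--         for j in range(n1):
--             R[i][j] = A[i][j]
--
--
--     for i in range(n2):
--         for j in range(n2):
--             R[i + n1][j + n1] = B[i][j]
--
--
--     for i in range(n1):
--         for j in range(n2):
--             R[i][j + n1] = 1
--             R[j + n1][i] = 1
--
--     return R
-- ===== SOURCE B (Python) =====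
-- def graphs_connection(A, B):
--     n1, n2 = len(A), len(B)
--     n = n1 + n2
--
--     def cell(i, j):
--         if (i < n1) != (j < n1):
--             return 1
--         return A[i][j] if i < n1 else B[i - n1][j - n1]
--
--     return [[cell(i, j) for j in range(n)] for i in range(n)]
-- ===== Notes on version B (the rewrite author's own statement) =====
-- stated objective: alternative
-- what changed: Instead of preallocating an (n1+n2)x(n1+n2) zero matrix and mutating it with three staged nested fill loops, B defines the matrix pointwise by one closed-form case function cell(i,j) (1 when i and j fall in different blocks, otherwise a direct lookup in A or B) evaluated over the full index space.
import Mathlib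
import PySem

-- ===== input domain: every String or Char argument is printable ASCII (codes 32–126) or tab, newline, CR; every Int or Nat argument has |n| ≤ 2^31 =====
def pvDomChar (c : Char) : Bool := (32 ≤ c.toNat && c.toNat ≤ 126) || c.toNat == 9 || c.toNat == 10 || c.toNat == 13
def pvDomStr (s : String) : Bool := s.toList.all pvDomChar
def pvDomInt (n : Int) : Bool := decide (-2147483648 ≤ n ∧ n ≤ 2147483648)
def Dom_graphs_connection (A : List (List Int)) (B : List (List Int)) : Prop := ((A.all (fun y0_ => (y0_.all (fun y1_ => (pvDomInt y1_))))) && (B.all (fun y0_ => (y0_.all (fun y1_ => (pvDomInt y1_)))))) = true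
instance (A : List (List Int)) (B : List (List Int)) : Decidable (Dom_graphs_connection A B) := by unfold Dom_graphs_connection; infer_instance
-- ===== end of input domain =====

-- B defines each entry by one closed-form case function cell(i,j) over the full index space,
-- instead of A's preallocated zero matrix mutated by three staged nested fill loops; objective: alternative.

-- ===== PORT A =====
-- R[i][j] = v (in-place row update); out-of-range set is a no-op, never reached inside Pre_
def pvUpd (R : List (List Int)) (i j : Nat) (v : Int) : List (List Int) :=
  R.set i ((R.getD i []).set j v)

-- M[i][j] read; Pre_graphs_connection excludes the inputs where Python's read raises IndexError,
-- so the default 0 is never the value used inside Pre_.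
def pvRd (M : List (List Int)) (i j : Nat) : Int := (M.getD i []).getD j 0

def graphs_connection (A : List (List Int)) (B : List (List Int)) : List (List Int) :=
  let n1 := A.length
  let n2 := B.length
  let cur_size := n1 + n2
  let R0 := List.replicate cur_size (List.replicate cur_size (0 : Int))
  let R1 := (List.range n1).foldl
    (fun R i => (List.range n1).foldl (fun R j => pvUpd R i j (pvRd A i j)) R) R0
  let R2 := (List.range n2).foldl
    (fun R i => (List.range n2).foldl (fun R j => pvUpd R (i + n1) (j + n1) (pvRd B i j)) R) R1
  let R3 := (List.range n1).foldl
    (fun R i => (List.range n2).foldl (fun R j => pvUpd (pvUpd R i (j + n1) 1) (j + n1) i 1) R) R2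
  R3

-- ===== PORT B =====
-- cell(i, j) from Source B: 1 across blocks, else a direct lookup in A or B
def pvCell (A : List (List Int)) (B : List (List Int)) (n1 : Nat) (i j : Nat) : Int :=
  if (decide (i < n1) != decide (j < n1)) = true then 1
  else if i < n1 then pvRd A i j else pvRd B (i - n1) (j - n1)

def graphs_connection_alt (A : List (List Int)) (B : List (List Int)) : List (List Int) :=
  let n1 := A.length
  let n2 := B.length
  let n := n1 + n2
  (List.range n).map (fun i => (List.range n).map (fun j => pvCell A B n1 i j))

-- ===== PRECONDITION & SPEC =====
-- Pre_ is exactly where the Python A returns: every row of A has at least len(A) entries and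
-- every row of B at least len(B) (otherwise the reads A[i][j] / B[i][j] raise IndexError).
def Pre_graphs_connection (A : List (List Int)) (B : List (List Int)) : Prop :=
  (∀ r ∈ A, A.length ≤ r.length) ∧ (∀ r ∈ B, B.length ≤ r.length)
instance (A : List (List Int)) (B : List (List Int)) : Decidable (Pre_graphs_connection A B) := by
  unfold Pre_graphs_connection; infer_instance

def pvWitness_graphs_connection : List (List Int) × List (List Int) :=
  ([[0, 1], [1, 0]], [[0]])

def Spec_graphs_connection (A : List (List Int)) (B : List (List Int)) (out : List (List Int)) : Prop := out = graphs_connection_alt A B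
instance (A : List (List Int)) (B : List (List Int)) (out : List (List Int)) : Decidable (Spec_graphs_connection A B out) := by unfold Spec_graphs_connection; infer_instance

-- ===== CLAIM (what is proved, stated in full; the proofs are below) =====
def Claim_equal_graphs_connection : Prop := ∀ (A : List (List Int)) (B : List (List Int)), Dom_graphs_connection A B → Pre_graphs_connection A B → Spec_graphs_connection A B (graphs_connection A B)

-- ===== LEMMAS AND PROOFS =====

-- `M` is a c×c matrix
def pvDims (c : Nat) (M : List (List Int)) : Prop :=
  M.length = c ∧ ∀ r ∈ M, r.length = c

-- entry (p,q) of M, with default 0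
def pvE (M : List (List Int)) (p q : Nat) : Int := (M.getD p []).getD q 0

theorem pvDims_upd {c : Nat} {R : List (List Int)} (h : pvDims c R) (i j : Nat) (v : Int) :
    pvDims c (pvUpd R i j v) := by
  obtain ⟨hlen, hrows⟩ := h
  by_cases hi : i < R.length
  · refine ⟨by simpa [pvUpd] using hlen, ?_⟩
    intro r hr
    rcases List.mem_or_eq_of_mem_set hr with hr' | hr'
    · exact hrows r hr'
    · subst hr'
      rw [List.length_set, List.getD_eq_getElem _ _ hi]
      exact hrows _ (List.getElem_mem hi)
  · rw [pvUpd, List.set_eq_of_length_le (by omega)]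
    exact ⟨hlen, hrows⟩

theorem pvE_upd {c : Nat} {R : List (List Int)} (h : pvDims c R) {i j : Nat}
    (hi : i < c) (hj : j < c) (v : Int) (p q : Nat) :
    pvE (pvUpd R i j v) p q = if p = i ∧ q = j then v else pvE R p q := by
  obtain ⟨hlen, hrows⟩ := h
  have hiR : i < R.length := by omega
  simp only [pvE, pvUpd, List.getD_eq_getElem?_getD]
  by_cases hp : p = i
  · subst hp
    have hrow : (R[p]?.getD []).length = c := by
      rw [← List.getD_eq_getElem?_getD, List.getD_eq_getElem _ _ hiR]
      exact hrows _ (List.getElem_mem hiR)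
    rw [List.getElem?_set_self hiR, Option.getD_some, List.getElem?_set]
    by_cases hq : q = j
    · subst hq
      rw [if_pos rfl, if_pos (by omega), Option.getD_some, if_pos ⟨rfl, rfl⟩]
    · rw [if_neg (fun h => hq h.symm), if_neg (by tauto)]
  · rw [List.getElem?_set_ne (fun h => hp h.symm), if_neg (by tauto)]

theorem pvE_zero (c p q : Nat) :
    pvE (List.replicate c (List.replicate c (0 : Int))) p q = 0 := by
  simp only [pvE, List.getD_eq_getElem?_getD, List.getElem?_replicate]
  by_cases hp : p < c
  · simp [hp, List.getElem?_replicate]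
    split <;> rfl
  · simp [hp]

theorem pvDims_replicate (c : Nat) :
    pvDims c (List.replicate c (List.replicate c (0 : Int))) := by
  refine ⟨List.length_replicate, ?_⟩
  intro r hr
  rw [List.eq_of_mem_replicate hr]; exact List.length_replicate

theorem pvDims_foldl {c : Nat} (f : List (List Int) → Nat → List (List Int))
    (hf : ∀ R j, pvDims c R → pvDims c (f R j)) :
    ∀ (l : List Nat) (R : List (List Int)), pvDims c R → pvDims c (l.foldl f R) := by
  intro l
  induction l with
  | nil => intro R h; simpa using h
  | cons x xs ih => intro R h; exact ih _ (hf R x h)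

-- loop 1 inner: for j in range(m): R[i][j] = A'[i][j]
theorem pvL1inner (A' : List (List Int)) {c : Nat} (i p q : Nat) (hi : i < c) :
    ∀ (m : Nat) (R : List (List Int)), pvDims c R → m ≤ c →
      pvE ((List.range m).foldl (fun R j => pvUpd R i j (pvRd A' i j)) R) p q
        = if p = i ∧ q < m then pvRd A' i q else pvE R p q := by
  intro m
  induction m with
  | zero => intro R h _; rw [List.range_zero, List.foldl_nil, if_neg (by omega)]
  | succ m ih =>
    intro R h hm
    rw [List.range_succ, List.foldl_append, List.foldl_cons, List.foldl_nil]
    have hD : pvDims c ((List.range m).foldl (fun R j => pvUpd R i j (pvRd A' i j)) R) :=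
      pvDims_foldl _ (fun R j hR => pvDims_upd hR i j _) _ R h
    rw [pvE_upd hD hi (by omega), ih R h (by omega)]
    by_cases hpi : p = i
    · by_cases hq : q = m
      · subst hq; rw [if_pos ⟨hpi, rfl⟩, if_pos ⟨hpi, by omega⟩]
      · by_cases hq2 : q < m
        · rw [if_neg (by omega), if_pos ⟨hpi, hq2⟩, if_pos ⟨hpi, by omega⟩]
        · rw [if_neg (by omega), if_neg (by omega), if_neg (by omega)]
    · rw [if_neg (by omega), if_neg (by omega), if_neg (by omega)]

-- loop 1 outer
theorem pvL1outer (A' : List (List Int)) {c : Nat} (m1 p q : Nat) (hm1 : m1 ≤ c) :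
    ∀ (n : Nat) (R : List (List Int)), pvDims c R → n ≤ c →
      pvE ((List.range n).foldl
        (fun R i => (List.range m1).foldl (fun R j => pvUpd R i j (pvRd A' i j)) R) R) p q
        = if p < n ∧ q < m1 then pvRd A' p q else pvE R p q := by
  intro n
  induction n with
  | zero => intro R h _; rw [List.range_zero, List.foldl_nil, if_neg (by omega)]
  | succ n ih =>
    intro R h hn
    rw [List.range_succ, List.foldl_append, List.foldl_cons, List.foldl_nil]
    have hD : pvDims c ((List.range n).foldl
        (fun R i => (List.range m1).foldl (fun R j => pvUpd R i j (pvRd A' i j)) R) R) :=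
      pvDims_foldl _ (fun R i hR => pvDims_foldl _ (fun R j hR => pvDims_upd hR i j _) _ R hR) _ R h
    rw [pvL1inner A' n p q (by omega) m1 _ hD hm1, ih R h (by omega)]
    by_cases hp : p = n
    · subst hp
      by_cases hq : q < m1
      · rw [if_pos ⟨rfl, hq⟩, if_pos ⟨by omega, hq⟩]
      · rw [if_neg (by omega), if_neg (by omega), if_neg (by omega)]
    · by_cases h2 : p < n ∧ q < m1
      · rw [if_neg (by omega), if_pos h2, if_pos ⟨by omega, h2.2⟩]
      · rw [if_neg (by omega), if_neg h2, if_neg (by omega)]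

-- loop 2 inner: for j in range(m): R[i+n1][j+n1] = B'[i][j]
theorem pvL2inner (B' : List (List Int)) {c : Nat} (n1 i p q : Nat) (hi : i + n1 < c) :
    ∀ (m : Nat) (R : List (List Int)), pvDims c R → m + n1 ≤ c →
      pvE ((List.range m).foldl (fun R j => pvUpd R (i + n1) (j + n1) (pvRd B' i j)) R) p q
        = if p = i + n1 ∧ n1 ≤ q ∧ q < m + n1 then pvRd B' i (q - n1) else pvE R p q := by
  intro m
  induction m with
  | zero => intro R h _; rw [List.range_zero, List.foldl_nil, if_neg (by omega)]
  | succ m ih =>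
    intro R h hm
    rw [List.range_succ, List.foldl_append, List.foldl_cons, List.foldl_nil]
    have hD : pvDims c ((List.range m).foldl (fun R j => pvUpd R (i + n1) (j + n1) (pvRd B' i j)) R) :=
      pvDims_foldl _ (fun R j hR => pvDims_upd hR _ _ _) _ R h
    rw [pvE_upd hD hi (by omega), ih R h (by omega)]
    by_cases h1 : p = i + n1 ∧ q = m + n1
    · obtain ⟨hp, hq⟩ := h1
      subst hq
      rw [if_pos ⟨hp, rfl⟩, if_pos ⟨hp, by omega, by omega⟩, Nat.add_sub_cancel]
    · by_cases h2 : p = i + n1 ∧ n1 ≤ q ∧ q < m + n1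
      · rw [if_neg h1, if_pos h2, if_pos ⟨h2.1, h2.2.1, by omega⟩]
      · rw [if_neg h1, if_neg h2, if_neg (by omega)]

-- loop 2 outer
theorem pvL2outer (B' : List (List Int)) {c : Nat} (n1 m2 p q : Nat) (hm2 : m2 + n1 ≤ c) :
    ∀ (n : Nat) (R : List (List Int)), pvDims c R → n + n1 ≤ c →
      pvE ((List.range n).foldl
        (fun R i => (List.range m2).foldl (fun R j => pvUpd R (i + n1) (j + n1) (pvRd B' i j)) R) R) p q
        = if n1 ≤ p ∧ p < n + n1 ∧ n1 ≤ q ∧ q < m2 + n1 then pvRd B' (p - n1) (q - n1)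
          else pvE R p q := by
  intro n
  induction n with
  | zero => intro R h _; rw [List.range_zero, List.foldl_nil, if_neg (by omega)]
  | succ n ih =>
    intro R h hn
    rw [List.range_succ, List.foldl_append, List.foldl_cons, List.foldl_nil]
    have hD : pvDims c ((List.range n).foldl
        (fun R i => (List.range m2).foldl (fun R j => pvUpd R (i + n1) (j + n1) (pvRd B' i j)) R) R) :=
      pvDims_foldl _ (fun R i hR => pvDims_foldl _ (fun R j hR => pvDims_upd hR _ _ _) _ R hR) _ R h
    rw [pvL2inner B' n1 n p q (by omega) m2 _ hD hm2, ih R h (by omega)]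
    by_cases h1 : p = n + n1 ∧ n1 ≤ q ∧ q < m2 + n1
    · obtain ⟨hp, hq1, hq2⟩ := h1
      subst hp
      rw [if_pos ⟨rfl, hq1, hq2⟩, if_pos ⟨by omega, by omega, hq1, hq2⟩, Nat.add_sub_cancel]
    · by_cases h2 : n1 ≤ p ∧ p < n + n1 ∧ n1 ≤ q ∧ q < m2 + n1
      · rw [if_neg h1, if_pos h2, if_pos ⟨h2.1, by omega, h2.2.2⟩]
      · rw [if_neg h1, if_neg h2, if_neg (by omega)]

-- loop 3 inner: for j in range(m): R[i][j+n1] = 1; R[j+n1][i] = 1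
theorem pvL3inner {c : Nat} (n1 i p q : Nat) (hi : i < c) :
    ∀ (m : Nat) (R : List (List Int)), pvDims c R → m + n1 ≤ c →
      pvE ((List.range m).foldl (fun R j => pvUpd (pvUpd R i (j + n1) 1) (j + n1) i 1) R) p q
        = if (p = i ∧ n1 ≤ q ∧ q < m + n1) ∨ (n1 ≤ p ∧ p < m + n1 ∧ q = i) then 1
          else pvE R p q := by
  intro m
  induction m with
  | zero => intro R h _; rw [List.range_zero, List.foldl_nil, if_neg (by omega)]
  | succ m ih =>
    intro R h hm
    rw [List.range_succ, List.foldl_append, List.foldl_cons, List.foldl_nil]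
    have hD : pvDims c ((List.range m).foldl (fun R j => pvUpd (pvUpd R i (j + n1) 1) (j + n1) i 1) R) :=
      pvDims_foldl _ (fun R j hR => pvDims_upd (pvDims_upd hR _ _ _) _ _ _) _ R h
    rw [pvE_upd (pvDims_upd hD _ _ _) (by omega) hi, pvE_upd hD hi (by omega), ih R h (by omega)]
    by_cases hC : (p = i ∧ n1 ≤ q ∧ q < m + 1 + n1) ∨ (n1 ≤ p ∧ p < m + 1 + n1 ∧ q = i)
    · rw [if_pos hC]
      by_cases h1 : p = m + n1 ∧ q = i
      · rw [if_pos h1]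
      · by_cases h2 : p = i ∧ q = m + n1
        · rw [if_neg h1, if_pos h2]
        · rw [if_neg h1, if_neg h2, if_pos (by omega)]
    · rw [if_neg hC, if_neg (by omega), if_neg (by omega), if_neg (by omega)]

-- loop 3 outer
theorem pvL3outer {c : Nat} (n1 m2 p q : Nat) (hm2 : m2 + n1 ≤ c) :
    ∀ (n : Nat) (R : List (List Int)), pvDims c R → n ≤ c →
      pvE ((List.range n).foldl
        (fun R i => (List.range m2).foldl (fun R j => pvUpd (pvUpd R i (j + n1) 1) (j + n1) i 1) R) R) p q
        = if (p < n ∧ n1 ≤ q ∧ q < m2 + n1) ∨ (n1 ≤ p ∧ p < m2 + n1 ∧ q < n) then 1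
          else pvE R p q := by
  intro n
  induction n with
  | zero => intro R h _; rw [List.range_zero, List.foldl_nil, if_neg (by omega)]
  | succ n ih =>
    intro R h hn
    rw [List.range_succ, List.foldl_append, List.foldl_cons, List.foldl_nil]
    have hD : pvDims c ((List.range n).foldl
        (fun R i => (List.range m2).foldl (fun R j => pvUpd (pvUpd R i (j + n1) 1) (j + n1) i 1) R) R) :=
      pvDims_foldl _ (fun R i hR =>
        pvDims_foldl _ (fun R j hR => pvDims_upd (pvDims_upd hR _ _ _) _ _ _) _ R hR) _ R h
    rw [pvL3inner n1 n p q (by omega) m2 _ hD hm2, ih R h (by omega)]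
    by_cases hC : (p < n + 1 ∧ n1 ≤ q ∧ q < m2 + n1) ∨ (n1 ≤ p ∧ p < m2 + n1 ∧ q < n + 1)
    · rw [if_pos hC]
      by_cases h1 : (p = n ∧ n1 ≤ q ∧ q < m2 + n1) ∨ (n1 ≤ p ∧ p < m2 + n1 ∧ q = n)
      · rw [if_pos h1]
      · rw [if_neg h1, if_pos (by omega)]
    · rw [if_neg hC, if_neg (by omega), if_neg (by omega)]

theorem pvEq_of_E {c : Nat} {M N : List (List Int)} (hM : pvDims c M) (hN : pvDims c N)
    (hE : ∀ p q, p < c → q < c → pvE M p q = pvE N p q) : M = N := by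
  obtain ⟨hMl, hMr⟩ := hM
  obtain ⟨hNl, hNr⟩ := hN
  apply List.ext_getElem (by rw [hMl, hNl])
  intro p h1 h2
  have hrM : M[p].length = c := hMr _ (List.getElem_mem h1)
  have hrN : N[p].length = c := hNr _ (List.getElem_mem h2)
  apply List.ext_getElem (by rw [hrM, hrN])
  intro q hq1 hq2
  have hE' := hE p q (by omega) (by omega)
  rw [pvE, pvE, List.getD_eq_getElem _ _ h1, List.getD_eq_getElem _ _ hq1,
    List.getD_eq_getElem _ _ h2, List.getD_eq_getElem _ _ hq2] at hE'
  exact hE'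

-- entries of B's pointwise matrix
theorem pvE_alt (A B : List (List Int)) (p q : Nat)
    (hp : p < A.length + B.length) (hq : q < A.length + B.length) :
    pvE (graphs_connection_alt A B) p q = pvCell A B A.length p q := by
  unfold graphs_connection_alt
  simp only [pvE, List.getD_eq_getElem?_getD, List.getElem?_map, List.getElem?_range hp,
    Option.map_some, Option.getD_some, List.getElem?_range hq]

theorem pvDims_alt (A B : List (List Int)) :
    pvDims (A.length + B.length) (graphs_connection_alt A B) := by
  unfold graphs_connection_alt
  exact ⟨by simp, by intro r hr; obtain ⟨i, hi, rfl⟩ := List.mem_map.mp hr; simp⟩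

-- ===== VERDICT (by name: the statement is the Claim_ definition above) =====
theorem graphs_connection_spec : Claim_equal_graphs_connection := by
  intro A B _ hPre
  show graphs_connection A B = graphs_connection_alt A B
  unfold graphs_connection
  dsimp only
  have hD0 : pvDims (A.length + B.length)
      (List.replicate (A.length + B.length) (List.replicate (A.length + B.length) (0 : Int))) :=
    pvDims_replicate _
  have hD1 := pvDims_foldl
    (fun R i => (List.range A.length).foldl (fun R j => pvUpd R i j (pvRd A i j)) R)
    (fun R i hR => pvDims_foldl _ (fun R j hR => pvDims_upd hR i j _) _ R hR)
    (List.range A.length) _ hD0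
  have hD2 := pvDims_foldl
    (fun R i => (List.range B.length).foldl
      (fun R j => pvUpd R (i + A.length) (j + A.length) (pvRd B i j)) R)
    (fun R i hR => pvDims_foldl _ (fun R j hR => pvDims_upd hR _ _ _) _ R hR)
    (List.range B.length) _ hD1
  have hD3 := pvDims_foldl
    (fun R i => (List.range B.length).foldl
      (fun R j => pvUpd (pvUpd R i (j + A.length) 1) (j + A.length) i 1) R)
    (fun R i hR => pvDims_foldl _ (fun R j hR => pvDims_upd (pvDims_upd hR _ _ _) _ _ _) _ R hR)
    (List.range A.length) _ hD2
  apply pvEq_of_E hD3 (pvDims_alt A B)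
  intro p q hp hq
  rw [pvL3outer (c := A.length + B.length) A.length B.length p q (by omega) A.length _ hD2 (by omega)]
  rw [pvL2outer B A.length B.length p q (by omega) B.length _ hD1 (by omega)]
  rw [pvL1outer A A.length p q (by omega) A.length _ hD0 (by omega)]
  rw [pvE_zero, pvE_alt A B p q hp hq]
  by_cases hp1 : p < A.length <;> by_cases hq1 : q < A.length
  · rw [if_neg (by omega), if_neg (by omega), if_pos ⟨hp1, hq1⟩]; simp [pvCell, hp1, hq1]
  · rw [if_pos (by omega)]; simp [pvCell, hp1, hq1]
  · rw [if_pos (by omega)]; simp [pvCell, hp1, hq1]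
  · rw [if_neg (by omega), if_pos (by omega)]; simp [pvCell, hp1, hq1]
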